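-- pv_equiv track=rewrite | github.com/arthurjyong/av_srt_generation | src/av_srt_generation/pipeline/subtitles.py | choose_split_point
-- ===== SOURCE A (Python) =====
-- _SPLIT_PUNCT = "。！？、,.!?"
--
-- def choose_split_point(text: str) -> int:
--     if not text:
--         return 0
--     midpoint = len(text) // 2
--     candidates = [idx for idx, ch in enumerate(text[:-1]) if ch in _SPLIT_PUNCT]
--     if not candidates:
--         return midpoint
--     best_idx = min(
--         candidates,
--         key=lambda idx: (abs(idx - midpoint), 0 if idx <= midpoint else 1),
--     )
--     split_at = best_idx + 1
--     if split_at <= 0 or split_at >= len(text):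
--         return midpoint
--     return split_at
-- ===== SOURCE B (Python) =====
-- _SPLIT_PUNCT = "。！？、,.!?"
--
--
-- def choose_split_point(text: str) -> int:
--     # Centre-out scan: try offsets d = 0, 1, ... from the midpoint, left side first,
--     # and return just after the first splittable punctuation found (never the last char).
--     n = len(text)
--     if n == 0:
--         return 0
--     mid = n // 2
--     for d in range(n):
--         left = mid - d
--         if 0 <= left <= n - 2 and text[left] in _SPLIT_PUNCT:
--             return left + 1
--         right = mid + d
--         if right <= n - 2 and text[right] in _SPLIT_PUNCT:
--             return right + 1
--     return mid
-- ===== Notes on version B (the rewrite author's own statement) =====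
-- stated objective: alternative
-- what changed: Replaces A's collect-all-candidates-then-min-by-key scan with a centre-out search from the midpoint (left position checked before right at each offset) that returns at the first punctuation hit.
import Mathlib
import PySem

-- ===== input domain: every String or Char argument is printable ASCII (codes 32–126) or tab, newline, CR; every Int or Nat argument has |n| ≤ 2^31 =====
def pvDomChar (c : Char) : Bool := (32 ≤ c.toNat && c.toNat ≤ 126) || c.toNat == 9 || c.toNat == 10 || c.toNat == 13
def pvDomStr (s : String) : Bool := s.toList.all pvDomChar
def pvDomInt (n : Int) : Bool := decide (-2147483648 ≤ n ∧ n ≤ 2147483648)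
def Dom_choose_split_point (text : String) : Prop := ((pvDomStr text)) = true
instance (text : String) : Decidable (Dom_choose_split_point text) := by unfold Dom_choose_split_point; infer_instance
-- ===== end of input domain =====

-- B replaces A's collect-all-candidates-then-min scan by a centre-out search from the
-- midpoint (alternative decomposition, same cost); return values proved equal on all inputs.

-- module constant _SPLIT_PUNCT, shared by both programs
def pvSplitPunct : List Char := "。！？、,.!?".toList

-- ===== PORT A =====
def choose_split_point (text : String) : Int :=
  let tl := text.toList
  if tl = [] then 0
  else
    let midpoint : Int := PySem.Int.floordiv (tl.length : Int) 2
    let candidates : List Int :=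
      ((PySem.List.enumerate (PySem.List.slice tl none (some (-1)))).filter
        (fun p => pvSplitPunct.contains p.2)).map (fun p => p.1)
    match PySem.List.min2? candidates (fun idx => |idx - midpoint|)
        (fun idx => if idx ≤ midpoint then (0 : Int) else 1) with
    | none => midpoint
    | some best_idx =>
      let split_at := best_idx + 1
      if split_at ≤ 0 ∨ split_at ≥ (tl.length : Int) then midpoint else split_at

-- ===== PORT B =====
-- the 'for d in range(n)' loop of Source B
def csAltGo (tl : List Char) (n mid d : Nat) : Int :=
  if _h : d < n then
    if d ≤ mid ∧ (mid - d) + 2 ≤ n ∧ pvSplitPunct.contains (tl.getD (mid - d) ' ') then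
      ((mid - d : Nat) : Int) + 1
    else if mid + d + 2 ≤ n ∧ pvSplitPunct.contains (tl.getD (mid + d) ' ') then
      ((mid + d : Nat) : Int) + 1
    else csAltGo tl n mid (d + 1)
  else (mid : Int)
termination_by n - d

def choose_split_point_alt (text : String) : Int :=
  let tl := text.toList
  let n := tl.length
  if n = 0 then 0
  else csAltGo tl n (n / 2) 0

-- ===== PRECONDITION & SPEC =====
def Spec_choose_split_point (text : String) (out : Int) : Prop := out = choose_split_point_alt text
instance (text : String) (out : Int) : Decidable (Spec_choose_split_point text out) := by unfold Spec_choose_split_point; infer_instance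

-- ===== CLAIM (what is proved, stated in full; the proofs are below) =====
def Claim_equal_choose_split_point : Prop := ∀ (text : String), Dom_choose_split_point text → Spec_choose_split_point text (choose_split_point text)

-- ===== LEMMAS AND PROOFS =====

-- a (Nat) index is a split candidate: before the last char, punctuation there
def pvP (tl : List Char) (k : Nat) : Prop :=
  k + 2 ≤ tl.length ∧ pvSplitPunct.contains (tl.getD k ' ') = true

-- distance to the midpoint
def pvDist (mid k : Nat) : Nat := if k ≤ mid then mid - k else k - mid

-- i0 is the candidate both programs select: minimal (distance-to-midpoint, index)
def pvGood (tl : List Char) (mid i0 : Nat) : Prop :=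
  pvP tl i0 ∧ ∀ k, pvP tl k →
    pvDist mid i0 < pvDist mid k ∨ (pvDist mid i0 = pvDist mid k ∧ i0 ≤ k)

theorem exists_good_aux (tl : List Char) (mid : Nat) :
    ∀ d, (∃ k, pvP tl k ∧ pvDist mid k < d) → ∃ i0, pvGood tl mid i0 := by
  intro d
  induction d with
  | zero => rintro ⟨k, _, hk⟩; omega
  | succ d ih =>
    rintro ⟨k, hPk, hk⟩
    by_cases hclose : ∃ k', pvP tl k' ∧ pvDist mid k' < d
    · exact ih hclose
    · push_neg at hclose
      have hdk : pvDist mid k = d := by have := hclose k hPk; omega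
      by_cases hL : d ≤ mid ∧ pvP tl (mid - d)
      · refine ⟨mid - d, hL.2, ?_⟩
        intro k' hPk'
        have hge := hclose k' hPk'
        have hdl : pvDist mid (mid - d) = d := by unfold pvDist; split <;> omega
        unfold pvDist at *
        split_ifs at * <;> omega
      · refine ⟨k, hPk, ?_⟩
        intro k' hPk'
        have hge := hclose k' hPk'
        have hkval : k = mid + d ∨ (d ≤ mid ∧ k = mid - d) := by
          unfold pvDist at hdk; split_ifs at hdk <;> omega
        rcases hkval with hkv | ⟨hkle, hkv⟩
        · by_cases hd' : pvDist mid k' = d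
          · have hk'v : k' = mid + d ∨ (d ≤ mid ∧ k' = mid - d) := by
              unfold pvDist at hd'; split_ifs at hd' <;> omega
            rcases hk'v with h | ⟨hle, h⟩
            · right; constructor <;> omega
            · exact absurd ⟨by omega, h ▸ hPk'⟩ hL
          · left; omega
        · exact absurd ⟨by omega, hkv ▸ hPk⟩ hL

theorem csAltGo_none (tl : List Char) (n mid : Nat)
    (hno : ∀ k, ¬ pvP tl k) (hn : n = tl.length) :
    ∀ d, csAltGo tl n mid d = (mid : Int) := by
  intro d
  induction' hfuel : n - d using Nat.strong_induction_on with fuel ih generalizing d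
  subst hfuel
  rw [csAltGo]
  split
  · next hd =>
    have h1 : ¬ (d ≤ mid ∧ (mid - d) + 2 ≤ n ∧ pvSplitPunct.contains (tl.getD (mid - d) ' ')) := by
      rintro ⟨_, h2, h3⟩; exact hno (mid - d) ⟨by omega, h3⟩
    have h2 : ¬ (mid + d + 2 ≤ n ∧ pvSplitPunct.contains (tl.getD (mid + d) ' ')) := by
      rintro ⟨h2, h3⟩; exact hno (mid + d) ⟨by omega, h3⟩
    rw [if_neg h1, if_neg h2]
    exact ih (n - (d + 1)) (by omega) (d + 1) rfl
  · rfl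

theorem csAltGo_found (tl : List Char) (n mid i0 : Nat)
    (hg : pvGood tl mid i0) (hn : n = tl.length) (hmid : 2 * mid ≤ n) :
    ∀ d, d ≤ pvDist mid i0 → csAltGo tl n mid d = (i0 : Int) + 1 := by
  obtain ⟨hP0, hmin⟩ := hg
  have hlen : i0 + 2 ≤ n := hn ▸ hP0.1
  intro d hd
  induction' hfuel : pvDist mid i0 - d using Nat.strong_induction_on with fuel ih generalizing d
  subst hfuel
  have hdistlt : pvDist mid i0 < n := by unfold pvDist; split <;> omega
  rw [csAltGo]
  rw [dif_pos (by omega)]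
  by_cases hend : d = pvDist mid i0
  · by_cases hi0 : i0 ≤ mid
    · have hi0v : i0 = mid - d ∧ d ≤ mid := by
        unfold pvDist at hend; split_ifs at hend <;> omega
      rw [if_pos ⟨hi0v.2, by omega, by rw [← hi0v.1]; exact hP0.2⟩]
      omega
    · have hi0v : i0 = mid + d := by unfold pvDist at hend; split_ifs at hend <;> omega
      have hLfalse : ¬ (d ≤ mid ∧ (mid - d) + 2 ≤ n ∧ pvSplitPunct.contains (tl.getD (mid - d) ' ')) := by
        rintro ⟨hdm, h2, h3⟩
        have h4 := hmin (mid - d) ⟨by omega, h3⟩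
        have h5 : pvDist mid (mid - d) = d := by unfold pvDist; split <;> omega
        rcases h4 with h4 | h4 <;> omega
      rw [if_neg hLfalse, if_pos ⟨by omega, by rw [← hi0v]; exact hP0.2⟩]
      omega
  · have hdlt : d < pvDist mid i0 := by omega
    have hLfalse : ¬ (d ≤ mid ∧ (mid - d) + 2 ≤ n ∧ pvSplitPunct.contains (tl.getD (mid - d) ' ')) := by
      rintro ⟨hdm, h2, h3⟩
      have h4 := hmin (mid - d) ⟨by omega, h3⟩
      have h5 : pvDist mid (mid - d) = d := by unfold pvDist; split <;> omega
      rcases h4 with h4 | h4 <;> omega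
    have hRfalse : ¬ (mid + d + 2 ≤ n ∧ pvSplitPunct.contains (tl.getD (mid + d) ' ')) := by
      rintro ⟨h2, h3⟩
      have h4 := hmin (mid + d) ⟨by omega, h3⟩
      have h5 : pvDist mid (mid + d) = d := by unfold pvDist; split <;> omega
      rcases h4 with h4 | h4 <;> omega
    rw [if_neg hLfalse, if_neg hRfalse]
    exact ih (pvDist mid i0 - (d + 1)) (by omega) (d + 1) (by omega) rfl

-- a fold whose step keeps the accumulator or takes the current element
theorem fold_step_mem {α : Type} (step : Option α → α → Option α)
    (hstep : ∀ acc y, step acc y = acc ∨ step acc y = some y) :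
    ∀ (l : List α) (acc : Option α),
      List.foldl step acc l = acc ∨ ∃ m ∈ l, List.foldl step acc l = some m := by
  intro l
  induction l with
  | nil => intro acc; left; rfl
  | cons y t ih =>
    intro acc
    rw [List.foldl_cons]
    rcases ih (step acc y) with h | ⟨m, hm, h⟩
    · rcases hstep acc y with h2 | h2
      · left; rw [h, h2]
      · right; exact ⟨y, by simp, by rw [h, h2]⟩
    · right; exact ⟨m, by simp [hm], h⟩

-- the min2? fold keeps an accumulator nothing in the rest of the list strictly beats
theorem min2?_fold_keeps {α : Type} (k1 k2 : α → Int) (step : Option α → α → Option α)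
    (hsome : ∀ m z, step (some m) z =
      if (decide (k1 z < k1 m) || !decide (k1 m < k1 z) && decide (k2 z < k2 m)) = true
      then some z else some m)
    (x : α) (l : List α)
    (hl : ∀ y ∈ l, k1 x ≤ k1 y ∧ (k1 y ≤ k1 x → k2 x ≤ k2 y)) :
    List.foldl step (some x) l = some x := by
  induction l with
  | nil => rfl
  | cons y t ih =>
    rw [List.foldl_cons, hsome x y]
    have h1 := (hl y (by simp)).1
    have h2 := (hl y (by simp)).2
    have hbf : (decide (k1 y < k1 x) || !decide (k1 x < k1 y) && decide (k2 y < k2 x)) = false := by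
      simp only [Bool.or_eq_false_iff, Bool.and_eq_false_iff, decide_eq_false_iff_not,
        Bool.not_eq_false', decide_eq_true_eq]
      refine ⟨by omega, ?_⟩
      by_cases h : k1 y ≤ k1 x
      · have h3 := h2 h; right; omega
      · left; omega
    rw [hbf]
    simp only [Bool.false_eq_true, if_false]
    exact ih (fun z hz => hl z (by simp [hz]))

-- the min2? fold from the empty accumulator returns the unique strict lexicographic minimum
theorem fold_min_abs {α : Type} (k1 k2 : α → Int) (step : Option α → α → Option α)
    (hnone : ∀ z, step none z = some z)
    (hsome : ∀ m z, step (some m) z =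
      if (decide (k1 z < k1 m) || !decide (k1 m < k1 z) && decide (k2 z < k2 m)) = true
      then some z else some m)
    (l1 l2 : List α) (x : α)
    (hmin : ∀ y ∈ l1 ++ x :: l2, y = x ∨ k1 x < k1 y ∨ (k1 x = k1 y ∧ k2 x < k2 y)) :
    List.foldl step none (l1 ++ x :: l2) = some x := by
  rw [List.foldl_append, List.foldl_cons]
  have hkeep := min2?_fold_keeps k1 k2 step hsome x l2 (by
    intro y hy
    rcases hmin y (by simp [hy]) with rfl | h | ⟨hk1, hk2⟩
    · exact ⟨le_refl _, fun _ => le_refl _⟩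
    · exact ⟨by omega, fun hle => by omega⟩
    · exact ⟨by omega, fun _ => by omega⟩)
  have hacc1 := fold_step_mem step (by
    intro acc y
    cases acc with
    | none => right; exact hnone y
    | some m =>
      rw [hsome]
      split
      · right; rfl
      · left; rfl) l1 none
  rcases hacc1 with h | ⟨m, hm, h⟩
  · rw [h, hnone x]; exact hkeep
  · rw [h, hsome m x]
    rcases hmin m (by simp [hm]) with rfl | hlt | ⟨hk1, hk2⟩
    · split <;> exact hkeep
    · rw [if_pos (by simp only [Bool.or_eq_true, decide_eq_true_eq]; left; exact hlt)]
      exact hkeep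
    · rw [if_pos (by
        simp only [Bool.or_eq_true, Bool.and_eq_true, decide_eq_true_eq, Bool.not_eq_true',
          decide_eq_false_iff_not]
        right; exact ⟨by omega, hk2⟩)]
      exact hkeep

-- min2? returns the unique strict lexicographic minimum
theorem min2?_eq_some_of_strict {α : Type} (xs : List α) (k1 k2 : α → Int) (x : α) (hx : x ∈ xs)
    (hmin : ∀ y ∈ xs, y = x ∨ k1 x < k1 y ∨ (k1 x = k1 y ∧ k2 x < k2 y)) :
    PySem.List.min2? xs k1 k2 = some x := by
  obtain ⟨l1, l2, rfl⟩ := List.append_of_mem hx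
  unfold PySem.List.min2?
  exact fold_min_abs k1 k2 _ (fun z => rfl) (fun m z => rfl) l1 l2 x hmin

-- |(k:Int) - mid| is pvDist
theorem abs_sub_eq_pvDist (mid k : Nat) : |(k : Int) - (mid : Nat)| = (pvDist mid k : Int) := by
  unfold pvDist
  split
  · rw [abs_of_nonpos (by omega)]; omega
  · rw [abs_of_nonneg (by omega)]; omega

-- membership in A's candidate list
theorem mem_candidates_iff (tl : List Char) (i : Int) :
    i ∈ ((PySem.List.enumerate (PySem.List.slice tl none (some (-1)))).filter
        (fun p => pvSplitPunct.contains p.2)).map (fun p => p.1) ↔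
      ∃ k : Nat, i = (k : Int) ∧ pvP tl k := by
  rw [PySem.List.slice_to_neg_one]
  simp only [List.mem_map, List.mem_filter, PySem.List.mem_enumerate_iff]
  constructor
  · rintro ⟨p, ⟨⟨k, hk, rfl⟩, hc⟩, rfl⟩
    refine ⟨k, by simp, ?_, ?_⟩
    · have := tl.length_dropLast; omega
    · have hkl : k < tl.length := by have := tl.length_dropLast; omega
      rw [List.getD_eq_getElem tl ' ' hkl]
      rw [List.getElem_dropLast] at hc
      exact hc
  · rintro ⟨k, rfl, hlen, hc⟩
    have hkd : k < tl.dropLast.length := by have := tl.length_dropLast; omega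
    refine ⟨(k, tl.dropLast[k]), ⟨⟨k, hkd, by simp⟩, ?_⟩, rfl⟩
    rw [List.getElem_dropLast]
    rw [List.getD_eq_getElem tl ' ' (by omega)] at hc
    exact hc

-- main equivalence
theorem choose_split_point_eq (text : String) :
    choose_split_point text = choose_split_point_alt text := by
  by_cases hnil : text.toList = []
  · unfold choose_split_point choose_split_point_alt
    rw [hnil]
    rfl
  · obtain ⟨tl, htl⟩ : ∃ tl, text.toList = tl := ⟨_, rfl⟩
    rw [htl] at hnil
    have hn1 : 1 ≤ tl.length := by
      cases tl with
      | nil => exact absurd rfl hnil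
      | cons a t => simp
    unfold choose_split_point choose_split_point_alt
    rw [htl]
    show (if tl = [] then (0 : Int) else
      match PySem.List.min2?
        (((PySem.List.enumerate (PySem.List.slice tl none (some (-1)))).filter
          (fun p => pvSplitPunct.contains p.2)).map (fun p => p.1))
        (fun idx => |idx - PySem.Int.floordiv (tl.length : Int) 2|)
        (fun idx => if idx ≤ PySem.Int.floordiv (tl.length : Int) 2 then (0 : Int) else 1) with
      | none => PySem.Int.floordiv (tl.length : Int) 2
      | some best_idx =>
        if best_idx + 1 ≤ 0 ∨ best_idx + 1 ≥ (tl.length : Int) then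
          PySem.Int.floordiv (tl.length : Int) 2
        else best_idx + 1) =
      (if tl.length = 0 then (0 : Int) else csAltGo tl tl.length (tl.length / 2) 0)
    rw [if_neg hnil, if_neg (by omega)]
    have hmidpoint : PySem.Int.floordiv (tl.length : Int) 2 = ((tl.length / 2 : Nat) : Int) := by
      unfold PySem.Int.floordiv
      rw [Int.fdiv_eq_ediv]
      omega
    rw [hmidpoint]
    by_cases hex : ∃ k, pvP tl k
    · obtain ⟨k, hk⟩ := hex
      have hdk : pvDist (tl.length / 2) k < tl.length := by
        have h1 := hk.1; unfold pvDist; split <;> omega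
      obtain ⟨i0, hgood⟩ :=
        exists_good_aux tl (tl.length / 2) tl.length ⟨k, hk, hdk⟩
      have hB := csAltGo_found tl tl.length (tl.length / 2) i0 hgood rfl (by omega) 0 (by omega)
      have hmin : PySem.List.min2?
          (((PySem.List.enumerate (PySem.List.slice tl none (some (-1)))).filter
            (fun p => pvSplitPunct.contains p.2)).map (fun p => p.1))
          (fun idx => |idx - ((tl.length / 2 : Nat) : Int)|)
          (fun idx => if idx ≤ ((tl.length / 2 : Nat) : Int) then (0 : Int) else 1) =
          some ((i0 : Nat) : Int) := by
        apply min2?_eq_some_of_strict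
        · exact (mem_candidates_iff tl _).2 ⟨i0, rfl, hgood.1⟩
        · intro y hy
          obtain ⟨k', rfl, hPk'⟩ := (mem_candidates_iff tl y).1 hy
          by_cases hkk : k' = i0
          · left; rw [hkk]
          · right
            rcases hgood.2 k' hPk' with hlt | ⟨heq, hle⟩
            · left
              rw [abs_sub_eq_pvDist, abs_sub_eq_pvDist]
              exact_mod_cast hlt
            · have hik : i0 < k' := by omega
              right
              refine ⟨?_, ?_⟩
              · rw [abs_sub_eq_pvDist, abs_sub_eq_pvDist]; exact_mod_cast heq
              · have hi0le : i0 ≤ tl.length / 2 ∧ tl.length / 2 < k' := by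
                  unfold pvDist at heq; split_ifs at heq <;> omega
                rw [if_pos (by exact_mod_cast hi0le.1),
                  if_neg (by simp only [not_le]; exact_mod_cast hi0le.2)]
                omega
      rw [hmin]
      show (if ((i0 : Nat) : Int) + 1 ≤ 0 ∨ ((i0 : Nat) : Int) + 1 ≥ (tl.length : Int) then
          ((tl.length / 2 : Nat) : Int)
        else ((i0 : Nat) : Int) + 1) = csAltGo tl tl.length (tl.length / 2) 0
      rw [if_neg (by
        have h1 := hgood.1.1
        push_neg
        constructor <;> omega)]
      exact hB.symm
    · push_neg at hex
      have hB := csAltGo_none tl tl.length (tl.length / 2) hex rfl 0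
      have hempty : (((PySem.List.enumerate (PySem.List.slice tl none (some (-1)))).filter
          (fun p => pvSplitPunct.contains p.2)).map (fun p => p.1)) = [] := by
        rw [List.eq_nil_iff_forall_not_mem]
        intro i hi
        obtain ⟨k', _, hPk'⟩ := (mem_candidates_iff tl i).1 hi
        exact hex k' hPk'
      rw [hempty]
      show ((tl.length / 2 : Nat) : Int) = csAltGo tl tl.length (tl.length / 2) 0
      exact hB.symm

-- ===== VERDICT (by name: the statement is the Claim_ definition above) =====
theorem choose_split_point_spec : Claim_equal_choose_split_point := by
  intro text _
  unfold Spec_choose_split_point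
  exact choose_split_point_eq text
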